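-- pv_equiv track=rewrite | github.com/matt-RHC/door-hardware-tracker | api/extract-tables.py | door_number_shape
-- ===== SOURCE A (Python) =====
-- def door_number_shape(door_num: str) -> str:
--     """
--     Convert a door number into a structural shape string for pattern comparison.
--     Replaces runs of digits with 'D', runs of letters with 'L', keeps separators.
--
--     Examples:
--         '1.01.A.01A' → 'D.D.L.DL'
--         '110-01C'    → 'D-DL'
--         'A-201B'     → 'L-DL'
--         'ST-100'     → 'L-D'
--         'DCB2'       → 'LD'
--     """
--     shape = ""
--     prev_type = ""
--     for ch in door_num:
--         if ch.isdigit():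
--             if prev_type != "D":
--                 shape += "D"
--                 prev_type = "D"
--         elif ch.isalpha():
--             if prev_type != "L":
--                 shape += "L"
--                 prev_type = "L"
--         else:
--             # Separator character (dot, dash, etc.) — keep as-is
--             shape += ch
--             prev_type = ch
--     return shape
-- ===== SOURCE B (Python) =====
-- def door_number_shape(door_num: str) -> str:
--     """Collapse digit runs to 'D' and letter runs to 'L', keeping separators.
--
--     Different decomposition from the state-machine original: scan by runs,
--     appending one piece per run (or per separator char) and skipping the run.
--     """
--     pieces = []
--     i, n = 0, len(door_num)
--     while i < n:
--         ch = door_num[i]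
--         if ch.isdigit():
--             pieces.append("D")
--             while i < n and door_num[i].isdigit():
--                 i += 1
--         elif ch.isalpha():
--             pieces.append("L")
--             while i < n and door_num[i].isalpha():
--                 i += 1
--         else:
--             pieces.append(ch)
--             i += 1
--     return "".join(pieces)
-- ===== Notes on version B (the rewrite author's own statement) =====
-- stated objective: alternative
-- what changed: Replaced the character-by-character state machine tracking prev_type with a run-skipping scan: one piece is appended per digit/letter run (the inner loop skips the whole run) or per separator char, then the pieces are joined.
import Mathlib
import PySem

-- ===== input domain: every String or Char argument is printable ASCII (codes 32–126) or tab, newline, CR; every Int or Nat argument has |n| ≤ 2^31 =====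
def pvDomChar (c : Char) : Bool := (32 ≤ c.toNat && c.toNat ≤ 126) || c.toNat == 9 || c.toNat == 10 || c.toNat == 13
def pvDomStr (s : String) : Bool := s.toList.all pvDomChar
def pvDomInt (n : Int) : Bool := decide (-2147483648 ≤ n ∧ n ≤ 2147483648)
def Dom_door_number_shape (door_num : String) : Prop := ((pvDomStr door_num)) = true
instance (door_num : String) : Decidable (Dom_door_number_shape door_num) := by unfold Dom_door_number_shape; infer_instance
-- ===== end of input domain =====

-- B replaces A's prev_type state machine with a run-skipping scan that joins one piece per run; same cost, different decomposition.

-- ===== PORT A =====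
-- literal transliteration: the loop body, then a fold over the characters carrying (shape, prev_type)
def pvStepA (st : String × String) (ch : Char) : String × String :=
  if PySem.Chars.isdigit ch then
    (if st.2 ≠ "D" then (st.1 ++ "D", "D") else st)
  else if PySem.Chars.isalpha ch then
    (if st.2 ≠ "L" then (st.1 ++ "L", "L") else st)
  else (st.1 ++ String.ofList [ch], String.ofList [ch])

def door_number_shape (door_num : String) : String :=
  (door_num.toList.foldl pvStepA ("", "")).1

-- ===== PORT B =====
-- one piece per digit/letter run (skipping the whole run, as Source B's inner while) or per separator character
def altGo : List Char → List String
  | [] => []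
  | c :: cs =>
    if PySem.Chars.isdigit c then
      "D" :: altGo ((c :: cs).dropWhile PySem.Chars.isdigit)
    else if PySem.Chars.isalpha c then
      "L" :: altGo ((c :: cs).dropWhile PySem.Chars.isalpha)
    else String.ofList [c] :: altGo cs
termination_by l => l.length
decreasing_by
  · simp only [List.dropWhile_cons_of_pos ‹_›, List.length_cons]
    exact Nat.lt_succ_of_le (List.length_dropWhile_le _ _)
  · simp only [List.dropWhile_cons_of_pos ‹_›, List.length_cons]
    exact Nat.lt_succ_of_le (List.length_dropWhile_le _ _)
  · simp

def door_number_shape_alt (door_num : String) : String :=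
  String.join (altGo door_num.toList)

-- ===== PRECONDITION & SPEC =====
def Spec_door_number_shape (door_num : String) (out : String) : Prop := out = door_number_shape_alt door_num
instance (door_num : String) (out : String) : Decidable (Spec_door_number_shape door_num out) := by unfold Spec_door_number_shape; infer_instance

-- ===== CLAIM (what is proved, stated in full; the proofs are below) =====
def Claim_equal_door_number_shape : Prop := ∀ (door_num : String), Dom_door_number_shape door_num → Spec_door_number_shape door_num (door_number_shape door_num)

-- ===== LEMMAS AND PROOFS =====

theorem pv_digit_not_alpha (c : Char) (h : PySem.Chars.isdigit c = true) :
    PySem.Chars.isalpha c = false := by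
  simp only [PySem.Chars.isdigit, PySem.Chars.isalpha, PySem.Chars.isupper, PySem.Chars.islower,
    Bool.and_eq_true, decide_eq_true_eq, Bool.or_eq_false_iff, Bool.and_eq_false_iff,
    decide_eq_false_iff_not, Char.le_def, UInt32.le_iff_toNat_le] at *
  have h0 : ('0':Char).val.toNat = 48 := by decide
  have h9 : ('9':Char).val.toNat = 57 := by decide
  have hA : ('A':Char).val.toNat = 65 := by decide
  have hZ : ('Z':Char).val.toNat = 90 := by decide
  have ha : ('a':Char).val.toNat = 97 := by decide
  have hz : ('z':Char).val.toNat = 122 := by decide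
  omega

theorem pv_sep_ne (c : Char) (h : PySem.Chars.isalpha c = false) :
    String.ofList [c] ≠ "D" ∧ String.ofList [c] ≠ "L" := by
  constructor
  · intro he
    have hc : c = 'D' := by have := congrArg String.toList he; simpa using this
    subst hc; exact absurd h (by decide)
  · intro he
    have hc : c = 'L' := by have := congrArg String.toList he; simpa using this
    subst hc; exact absurd h (by decide)

theorem pv_foldl_append : ∀ (xs : List String) (x : String),
    List.foldl (fun r s => r ++ s) x xs = x ++ List.foldl (fun r s => r ++ s) "" xs
  | [], x => by simp
  | y :: ys, x => by
    rw [List.foldl_cons, List.foldl_cons, pv_foldl_append ys (x ++ y), pv_foldl_append ys ("" ++ y)]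
    simp [String.append_assoc]

theorem pv_join_cons (x : String) (xs : List String) :
    String.join (x :: xs) = x ++ String.join xs := by
  simp only [String.join, List.foldl_cons]
  rw [pv_foldl_append xs ("" ++ x)]
  simp

-- the "remaining input" seen from A's state: a prev_type of "D"/"L" absorbs a leading same-kind run
def pvRest (prev : String) (l : List Char) : List Char :=
  if prev = "D" then l.dropWhile PySem.Chars.isdigit
  else if prev = "L" then l.dropWhile PySem.Chars.isalpha
  else l

theorem pv_rest_cons_of_new (prev : String) (c : Char) (cs : List Char)
    (hd : PySem.Chars.isdigit c = false ∨ prev ≠ "D")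
    (ha : PySem.Chars.isalpha c = false ∨ prev ≠ "L") :
    pvRest prev (c :: cs) = c :: cs := by
  unfold pvRest
  split_ifs with h1 h2
  · rcases hd with hd | hd
    · exact List.dropWhile_cons_of_neg (by simp [hd])
    · exact absurd h1 hd
  · rcases ha with ha | ha
    · exact List.dropWhile_cons_of_neg (by simp [ha])
    · exact absurd h2 ha
  · rfl

theorem pv_main (l : List Char) : ∀ (shape prev : String),
    (l.foldl pvStepA (shape, prev)).1 = shape ++ String.join (altGo (pvRest prev l)) := by
  induction l with
  | nil =>
    intro shape prev
    simp only [List.foldl_nil]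
    unfold pvRest
    split_ifs <;> simp [altGo, String.join]
  | cons c cs ih =>
    intro shape prev
    rw [List.foldl_cons]
    by_cases hd : PySem.Chars.isdigit c = true
    · by_cases hp : prev = "D"
      · subst hp
        rw [show pvStepA (shape, "D") c = (shape, "D") from by simp [pvStepA, hd]]
        rw [ih shape "D"]
        have : pvRest "D" (c :: cs) = pvRest "D" cs := by
          simp [pvRest, List.dropWhile_cons_of_pos hd]
        rw [this]
      · rw [show pvStepA (shape, prev) c = (shape ++ "D", "D") from by simp [pvStepA, hd, hp]]
        rw [ih (shape ++ "D") "D"]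
        rw [pv_rest_cons_of_new prev c cs (Or.inr hp) (Or.inl (pv_digit_not_alpha c hd))]
        rw [show altGo (c :: cs) = "D" :: altGo ((c :: cs).dropWhile PySem.Chars.isdigit) from by
          rw [altGo]; simp [hd]]
        rw [pv_join_cons, List.dropWhile_cons_of_pos hd, ← String.append_assoc]
        simp [pvRest]
    · replace hd : PySem.Chars.isdigit c = false := by simpa using hd
      by_cases ha : PySem.Chars.isalpha c = true
      · by_cases hp : prev = "L"
        · subst hp
          rw [show pvStepA (shape, "L") c = (shape, "L") from by simp [pvStepA, hd, ha]]
          rw [ih shape "L"]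
          have : pvRest "L" (c :: cs) = pvRest "L" cs := by
            simp [pvRest, List.dropWhile_cons_of_pos ha]
          rw [this]
        · rw [show pvStepA (shape, prev) c = (shape ++ "L", "L") from by simp [pvStepA, hd, ha, hp]]
          rw [ih (shape ++ "L") "L"]
          rw [pv_rest_cons_of_new prev c cs (Or.inl hd) (Or.inr hp)]
          rw [show altGo (c :: cs) = "L" :: altGo ((c :: cs).dropWhile PySem.Chars.isalpha) from by
            rw [altGo]; simp [hd, ha]]
          rw [pv_join_cons, List.dropWhile_cons_of_pos ha, ← String.append_assoc]
          simp [pvRest]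
      · replace ha : PySem.Chars.isalpha c = false := by simpa using ha
        rw [show pvStepA (shape, prev) c = (shape ++ String.ofList [c], String.ofList [c]) from by
          simp [pvStepA, hd, ha]]
        rw [ih (shape ++ String.ofList [c]) (String.ofList [c])]
        rw [pv_rest_cons_of_new prev c cs (Or.inl hd) (Or.inl ha)]
        have hne := pv_sep_ne c ha
        have : pvRest (String.ofList [c]) cs = cs := by
          simp [pvRest, hne.1, hne.2]
        rw [this]
        rw [show altGo (c :: cs) = String.ofList [c] :: altGo cs from by
          rw [altGo]; simp [hd, ha]]
        rw [pv_join_cons, ← String.append_assoc]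

-- ===== VERDICT (by name: the statement is the Claim_ definition above) =====
theorem door_number_shape_spec : Claim_equal_door_number_shape := by
  intro s _
  unfold Spec_door_number_shape door_number_shape door_number_shape_alt
  rw [pv_main]
  simp [pvRest]
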